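-- pv_equiv track=rewrite | github.com/iangregson/advent-of-code | 2015/day/11/solution.py | has_pairs
-- ===== SOURCE A (Python) =====
-- def has_pairs(pw):
--     i = 0
--     j = 1
--     pairs = []
--     while i < len(pw):
--         I = pw[i]
--         J = ''
--         try:
--             J = pw[j]
--         except:
--             J = None
--         i += 1
--         j += 1
--
--         if I == J:
--             p = "".join([c for c in [I, J]])
--             pairs.append(p)
--     uniq_pairs = []
--     for pair in pairs:
--         if pair not in uniq_pairs:
--             uniq_pairs.append(pair)
--
--     if len(uniq_pairs) >= 2:
--         return True
--
--     return False
-- ===== SOURCE B (Python) =====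
-- def has_pairs(pw):
--     # Run-length decomposition: skip over each maximal run of identical characters;
--     # a run of length >= 2 contributes its character to the set of "doubled" letters.
--     # True as soon as two distinct doubled letters are found.
--     doubled = set()
--     i, n = 0, len(pw)
--     while i < n:
--         j = i + 1
--         while j < n and pw[j] == pw[i]:
--             j += 1
--         if j - i >= 2:
--             doubled.add(pw[i])
--             if len(doubled) >= 2:
--                 return True
--         i = j
--     return False
-- ===== Notes on version B (the rewrite author's own statement) =====
-- stated objective: faster
-- what changed: Replaces A's adjacent-pair index scan with try/except plus a quadratic list-dedup pass by a run-length decomposition: skip each maximal run of identical characters, collect the character of every run of length >= 2 in a set, and return early once two distinct such characters are found.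
import Mathlib
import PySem

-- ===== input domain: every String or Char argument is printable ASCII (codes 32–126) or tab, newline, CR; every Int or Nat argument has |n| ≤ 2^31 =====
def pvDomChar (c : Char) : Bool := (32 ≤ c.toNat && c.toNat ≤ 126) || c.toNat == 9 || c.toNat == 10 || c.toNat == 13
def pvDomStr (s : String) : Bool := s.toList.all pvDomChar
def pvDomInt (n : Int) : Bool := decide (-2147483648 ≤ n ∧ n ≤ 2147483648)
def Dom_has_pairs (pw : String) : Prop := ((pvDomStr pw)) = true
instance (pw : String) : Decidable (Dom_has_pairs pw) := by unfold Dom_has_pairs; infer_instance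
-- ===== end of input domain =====

-- B replaces A's pairwise index scan + manual dedup list by a run-length decomposition
-- (skip each maximal run, collect characters of runs of length >= 2 in a set, early exit at 2).

-- ===== PORT A =====
-- the while loop: i walks the string, j = i+1 indexed with try/except (pyGet?); collects "".join([I,J]) when equal
def pvALoop (l : List Char) (i : Nat) (pairs : List String) : List String :=
  if h : i < l.length then
    let I := l[i]
    let pairs' :=
      match PySem.List.pyGet? l ((i + 1 : Nat) : Int) with
      | some c => if I == c then pairs ++ [String.ofList [I, c]] else pairs
      | none => pairs
    pvALoop l (i + 1) pairs'
  else pairs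
termination_by l.length - i

-- the second loop: keep first occurrences
def pvUniq (ps : List String) (acc : List String) : List String :=
  match ps with
  | [] => acc
  | p :: rest => pvUniq rest (if acc.contains p then acc else acc ++ [p])

def has_pairs (pw : String) : Bool :=
  decide (2 ≤ (pvUniq (pvALoop pw.toList 0 []) []).length)

-- ===== PORT B =====
-- inner while loop: consume the rest of the run of c; returns (number of extra copies of c, remainder)
def pvRun (c : Char) : List Char → Nat × List Char
  | x :: rest => if x == c then let (n, r) := pvRun c rest; (n + 1, r) else (0, x :: rest)
  | [] => (0, [])

theorem pvRun_len (c : Char) : ∀ (l : List Char), (pvRun c l).2.length ≤ l.length := by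
  intro l
  induction l with
  | nil => simp [pvRun]
  | cons x rest ih =>
    by_cases h : x == c
    · simp only [pvRun, h, if_pos]
      calc (pvRun c rest).2.length ≤ rest.length := ih
        _ ≤ (x :: rest).length := by simp
    · simp [pvRun, h]

-- outer while loop: one iteration per maximal run; early return once two doubled letters are found
def pvBLoop (l : List Char) (doubled : PySem.Set Char) : Bool :=
  match l with
  | [] => false
  | c :: rest =>
    let p := pvRun c rest
    if 1 ≤ p.1 then
      let d' := PySem.Set.add doubled c
      if 2 ≤ PySem.Set.len d' then true else pvBLoop p.2 d'
    else pvBLoop p.2 doubled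
termination_by l.length
decreasing_by
  · have := pvRun_len c rest; simp only [List.length_cons]; omega
  · have := pvRun_len c rest; simp only [List.length_cons]; omega

def has_pairs_alt (pw : String) : Bool :=
  pvBLoop pw.toList PySem.Set.empty

-- ===== PRECONDITION & SPEC =====
def Spec_has_pairs (pw : String) (out : Bool) : Prop := out = has_pairs_alt pw
instance (pw : String) (out : Bool) : Decidable (Spec_has_pairs pw out) := by unfold Spec_has_pairs; infer_instance

-- ===== CLAIM (what is proved, stated in full; the proofs are below) =====
def Claim_equal_has_pairs : Prop := ∀ (pw : String), Dom_has_pairs pw → Spec_has_pairs pw (has_pairs pw)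

-- ===== LEMMAS AND PROOFS =====

-- the characters that start an adjacent duplicate pair, structurally
def pvAdj : List Char → List Char
  | a :: b :: rest => (if a == b then [a] else []) ++ pvAdj (b :: rest)
  | _ => []

def pvDbl (c : Char) : String := String.ofList [c, c]

theorem pvDbl_inj : Function.Injective pvDbl := by
  intro a b h
  have h2 := congrArg String.toList h
  simpa [pvDbl] using h2

theorem pvALoop_eq (l : List Char) : ∀ (i : Nat) (pairs : List String),
    pvALoop l i pairs = pairs ++ (pvAdj (l.drop i)).map pvDbl := by
  intro i
  induction hn : l.length - i using Nat.strong_induction_on generalizing i with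
  | _ n ih =>
    intro pairs
    rw [pvALoop]
    by_cases h : i < l.length
    · simp only [h, dif_pos]
      have hdrop : l.drop i = l[i] :: l.drop (i + 1) :=
        List.drop_eq_getElem_cons h
      have hrec := ih (l.length - (i + 1)) (by omega) (i + 1) rfl
      by_cases h2 : i + 1 < l.length
      · have hget : PySem.List.pyGet? l ((i + 1 : Nat) : Int) = some l[i + 1] := by
          rw [PySem.List.pyGet?_natCast]; exact List.getElem?_eq_getElem h2
        have hdrop2 : l.drop (i + 1) = l[i + 1] :: l.drop (i + 2) :=
          List.drop_eq_getElem_cons h2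
        rw [hget, hrec, hdrop, hdrop2]
        by_cases he : l[i] == l[i + 1]
        · simp [pvAdj, pvDbl, eq_of_beq he]
        · simp [he, pvAdj]
      · have hget : PySem.List.pyGet? l ((i + 1 : Nat) : Int) = none := by
          rw [PySem.List.pyGet?_natCast, List.getElem?_eq_none_iff]
          omega
        have hnil : l.drop (i + 1) = [] := List.drop_eq_nil_of_le (by omega)
        rw [hget, hrec, hdrop, hnil]
        simp [pvAdj]
    · simp only [h, dif_neg, not_false_iff]
      rw [List.drop_eq_nil_of_le (by omega)]
      simp [pvAdj]

theorem pvUniq_map (xs : List Char) : ∀ (accC : List Char),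
    pvUniq (xs.map pvDbl) (accC.map pvDbl) = (xs.foldl PySem.Set.add accC).map pvDbl := by
  induction xs with
  | nil => intro accC; rfl
  | cons x rest ih =>
    intro accC
    have hmem : pvDbl x ∈ accC.map pvDbl ↔ x ∈ accC := by
      constructor
      · intro h
        obtain ⟨c, hcm, he⟩ := List.mem_map.mp h
        exact (pvDbl_inj he) ▸ hcm
      · intro h; exact List.mem_map_of_mem h
    rw [List.map_cons, pvUniq, List.foldl_cons]
    by_cases hc : x ∈ accC
    · have h1 : (accC.map pvDbl).contains (pvDbl x) = true := by
        rw [List.contains_iff_mem]; exact hmem.mpr hc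
      have h2 : PySem.Set.add accC x = accC := by
        simp [PySem.Set.add, PySem.Set.contains, hc]
      rw [h1, h2]
      simpa using ih accC
    · have h1 : (accC.map pvDbl).contains (pvDbl x) = false := by
        rw [← Bool.not_eq_true, List.contains_iff_mem, hmem]
        exact hc
      have h2 : PySem.Set.add accC x = accC ++ [x] := by
        simp [PySem.Set.add, PySem.Set.contains, hc]
      rw [h1, h2]
      have hmap : (accC.map pvDbl) ++ [pvDbl x] = (accC ++ [x]).map pvDbl := by
        rw [List.map_append, List.map_cons, List.map_nil]
      rw [if_neg (by simp), hmap]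
      exact ih (accC ++ [x])

-- pvAdj of a run: the run's head repeated (run length - 1) times, then the rest
theorem pvAdj_run (c : Char) : ∀ (rest : List Char),
    pvAdj (c :: rest) = List.replicate (pvRun c rest).1 c ++ pvAdj (pvRun c rest).2 := by
  intro rest
  induction rest generalizing c with
  | nil => simp [pvRun, pvAdj]
  | cons x t ih =>
    by_cases h : x == c
    · have hx : x = c := eq_of_beq h
      subst hx
      have := ih x
      simp only [pvRun, beq_self_eq_true, if_pos]
      rw [pvAdj]
      simp only [beq_self_eq_true, if_pos, List.singleton_append]
      rw [this]
      cases hp : pvRun x t with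
      | mk n r => simp [List.replicate_succ]
    · have hne : ¬ (c == x) := fun hcx => h (beq_of_eq (eq_of_beq hcx).symm)
      simp [pvRun, h, pvAdj, hne]

theorem pvAdd_mono (s : PySem.Set Char) (c : Char) :
    PySem.Set.len s ≤ PySem.Set.len (PySem.Set.add s c) := by
  rw [PySem.Set.add_eq_ite]
  split <;> simp [PySem.Set.len]

theorem pvFoldl_mono (xs : List Char) : ∀ (s : PySem.Set Char),
    PySem.Set.len s ≤ PySem.Set.len (xs.foldl PySem.Set.add s) := by
  induction xs with
  | nil => intro s; simp
  | cons x t ih =>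
    intro s
    calc PySem.Set.len s ≤ PySem.Set.len (PySem.Set.add s x) := pvAdd_mono s x
      _ ≤ _ := ih (PySem.Set.add s x)

theorem pvAdd_idem (s : PySem.Set Char) (c : Char) :
    PySem.Set.add (PySem.Set.add s c) c = PySem.Set.add s c := by
  by_cases h : c ∈ s <;> simp [PySem.Set.add_eq_ite, h]

theorem pvFoldl_replicate (c : Char) : ∀ (n : Nat) (s : PySem.Set Char), 1 ≤ n →
    (List.replicate n c).foldl PySem.Set.add s = PySem.Set.add s c := by
  intro n
  induction n with
  | zero => intro s h; omega
  | succ m ih =>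
    intro s _
    rw [List.replicate_succ, List.foldl_cons]
    cases Nat.eq_zero_or_pos m with
    | inl h0 => subst h0; simp
    | inr hpos => rw [ih (PySem.Set.add s c) hpos, pvAdd_idem]

-- B's loop computes "at least two distinct doubled letters" of pvAdj, given the set is still small
theorem pvBLoop_eq (l : List Char) : ∀ (s : PySem.Set Char), PySem.Set.len s < 2 →
    pvBLoop l s = decide (2 ≤ PySem.Set.len ((pvAdj l).foldl PySem.Set.add s)) := by
  induction hn : l.length using Nat.strong_induction_on generalizing l with
  | _ n ih =>
    intro s hs
    cases l with
    | nil =>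
      simp only [pvBLoop, pvAdj, List.foldl_nil]
      symm
      rw [decide_eq_false_iff_not]
      omega
    | cons c rest =>
      rw [pvBLoop]
      cases hp : pvRun c rest with
      | mk m r =>
        dsimp only
        have hrlen : r.length ≤ rest.length := by
          have := pvRun_len c rest; rw [hp] at this; exact this
        have hadj : pvAdj (c :: rest) = List.replicate m c ++ pvAdj r := by
          have := pvAdj_run c rest; rw [hp] at this; exact this
        rw [hadj, List.foldl_append]
        by_cases hm : 1 ≤ m
        · simp only [hm, if_pos]
          rw [pvFoldl_replicate c m s hm]
          by_cases h2 : 2 ≤ PySem.Set.len (PySem.Set.add s c)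
          · simp only [h2, if_pos]
            have hmono := pvFoldl_mono (pvAdj r) (PySem.Set.add s c)
            have hge : 2 ≤ PySem.Set.len ((pvAdj r).foldl PySem.Set.add (PySem.Set.add s c)) := by omega
            exact (decide_eq_true hge).symm
          · simp only [h2, if_neg, not_false_iff]
            subst hn
            exact ih r.length (by simp; omega) r rfl (PySem.Set.add s c) (by omega)
        · have hm0 : m = 0 := by omega
          subst hm0
          simp only [List.replicate_zero, List.foldl_nil]
          rw [if_neg (by omega)]
          subst hn
          exact ih r.length (by simp; omega) r rfl s hs

-- ===== VERDICT (by name: the statement is the Claim_ definition above) =====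
theorem has_pairs_spec : Claim_equal_has_pairs := by
  intro pw _
  unfold Spec_has_pairs has_pairs has_pairs_alt
  have hA : pvUniq (pvALoop pw.toList 0 []) [] =
      ((pvAdj pw.toList).foldl PySem.Set.add []).map pvDbl := by
    rw [pvALoop_eq]
    simp only [List.drop_zero, List.nil_append]
    have h := pvUniq_map (pvAdj pw.toList) []
    simpa using h
  rw [pvBLoop_eq pw.toList PySem.Set.empty (by simp [PySem.Set.empty, PySem.Set.len])]
  rw [decide_eq_decide, hA, List.length_map]
  simp [PySem.Set.len, PySem.Set.empty]
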